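-- pv_equiv track=rewrite | github.com/andyhcwang/veery | src/veery/miner.py | _expand_phonetic_variants
-- ===== SOURCE A (Python) =====
-- import itertools
--
-- _PHONETIC_SUBS: dict[str, list[str]] = {
--     "py": ["pie"],
--     "db": ["dee bee"],
--     "js": ["j s"],
--     "ts": ["t s"],
--     "ml": ["m l"],
--     "ai": ["a i"],
--     "sql": ["s q l", "sequel"],
--     "api": ["a p i"],
--     "llm": ["l l m"],
--     "cli": ["c l i"],
--     "gpu": ["g p u"],
--     "cpu": ["c p u"],
--     "npm": ["n p m"],
--     "aws": ["a w s"],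
--     "gcp": ["g c p"],
--     "ssh": ["s s h"],
--     "url": ["u r l"],
--     "gui": ["g u i", "gooey"],
--     "ux": ["u x"],
--     "ui": ["u i"],
--     "ci": ["c i"],
--     "cd": ["c d"],
--     "qa": ["q a"],
--     "os": ["o s"],
--     "io": ["i o"],
--     "vm": ["v m"],
--     "k8s": ["k 8 s", "kubernetes"],
--     "pr": ["p r"],
--     "env": ["e n v"],
--     "mcp": ["m c p"],
-- }
--
-- def _expand_phonetic_variants(parts: list[str]) -> list[str]:
--     """Generate phonetic variants by substituting known fragments.
--
--     Applies _PHONETIC_SUBS to each part (case-insensitive), then builds the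
--     cartesian product.  Capped at 8 results to prevent explosion.
--     """
--     options_per_part: list[list[str]] = []
--     for part in parts:
--         key = part.lower()
--         subs = _PHONETIC_SUBS.get(key)
--         options_per_part.append([key] + subs if subs else [key])
--
--     return [
--         " ".join(combo)
--         for combo in itertools.islice(itertools.product(*options_per_part), 8)
--     ]
-- ===== SOURCE B (Python) =====
-- # Most phonetic substitutions are just the key spelled out character by
-- # character; only five keys carry an extra irregular variant.
-- _SPELL_OUT = frozenset({
--     "js", "ts", "ml", "ai", "sql", "api", "llm", "cli", "gpu", "cpu",
--     "npm", "aws", "gcp", "ssh", "url", "gui", "ux", "ui", "ci", "cd",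
--     "qa", "os", "io", "vm", "k8s", "pr", "env", "mcp",
-- })
--
-- _EXTRA = {
--     "py": "pie",
--     "db": "dee bee",
--     "sql": "sequel",
--     "gui": "gooey",
--     "k8s": "kubernetes",
-- }
--
--
-- def _expand_phonetic_variants(parts: list[str]) -> list[str]:
--     """Level-by-level pruned cross-product over shared cons-cell chains.
--
--     Keeps at most 8 partial combinations (pruning after every part), extends a
--     prefix in O(1), and materializes the surviving chains at the end.  The
--     spelled-out variants are derived by rule (" ".join(key)) instead of being
--     stored in a table; only five keys carry an irregular extra variant.
--     """
--     acc = [None]  # chain = None | (parent_chain, opt)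
--     for part in parts:
--         key = part.lower()
--         opts = [key]
--         if key in _SPELL_OUT:
--             opts.append(" ".join(key))
--         extra = _EXTRA.get(key)
--         if extra is not None:
--             opts.append(extra)
--         acc = [(chain, opt) for chain in acc for opt in opts][:8]
--     out = []
--     for chain in acc:
--         combo = []
--         while chain is not None:
--             chain, opt = chain
--             combo.append(opt)
--         combo.reverse()
--         out.append(" ".join(combo))
--     return out
-- ===== Notes on version B (the rewrite author's own statement) =====
-- stated objective: alternative
-- what changed: Replaces the stored substitution table + itertools.product + islice pipeline with an iterative level-by-level cross-product over shared cons-cell chains pruned to 8 after every part, and derives the spelled-out variants by rule (" ".join(key)) from a key set plus five irregular extras instead of storing every variant.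
import Mathlib
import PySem

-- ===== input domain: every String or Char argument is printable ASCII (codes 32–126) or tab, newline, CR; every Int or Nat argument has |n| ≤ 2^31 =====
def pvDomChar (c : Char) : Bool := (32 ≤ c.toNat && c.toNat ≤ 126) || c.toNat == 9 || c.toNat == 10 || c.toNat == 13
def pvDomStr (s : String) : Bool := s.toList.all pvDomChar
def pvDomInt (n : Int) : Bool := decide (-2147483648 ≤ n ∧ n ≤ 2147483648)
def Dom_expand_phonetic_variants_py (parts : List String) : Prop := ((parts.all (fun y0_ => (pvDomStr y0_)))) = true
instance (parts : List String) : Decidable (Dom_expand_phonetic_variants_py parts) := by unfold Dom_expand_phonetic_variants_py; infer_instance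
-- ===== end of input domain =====

-- B replaces the stored-table + itertools.product + islice pipeline with an iterative
-- level-by-level cross-product over cons-cell chains, pruned to 8 after every part, and
-- derives the spelled-out variants by rule (" ".join(key)) from a key set + 5 irregular
-- extras (objective: alternative).



-- ===== PORT A =====
-- the module constant _PHONETIC_SUBS
def pvSubs : PySem.Dict String (List String) := PySem.Dict.ofList [
  ("py", ["pie"]),
  ("db", ["dee bee"]),
  ("js", ["j s"]),
  ("ts", ["t s"]),
  ("ml", ["m l"]),
  ("ai", ["a i"]),
  ("sql", ["s q l", "sequel"]),
  ("api", ["a p i"]),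
  ("llm", ["l l m"]),
  ("cli", ["c l i"]),
  ("gpu", ["g p u"]),
  ("cpu", ["c p u"]),
  ("npm", ["n p m"]),
  ("aws", ["a w s"]),
  ("gcp", ["g c p"]),
  ("ssh", ["s s h"]),
  ("url", ["u r l"]),
  ("gui", ["g u i", "gooey"]),
  ("ux", ["u x"]),
  ("ui", ["u i"]),
  ("ci", ["c i"]),
  ("cd", ["c d"]),
  ("qa", ["q a"]),
  ("os", ["o s"]),
  ("io", ["i o"]),
  ("vm", ["v m"]),
  ("k8s", ["k 8 s", "kubernetes"]),
  ("pr", ["p r"]),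
  ("env", ["e n v"]),
  ("mcp", ["m c p"])]

-- key = part.lower(); subs = _PHONETIC_SUBS.get(key); [key] + subs if subs else [key]
def pvOptions (part : String) : List String :=
  let key := PySem.Str.lower part
  match pvSubs.get? key with
  | some subs => key :: subs
  | none => [key]

-- itertools.product(*opts): first iterable varies slowest, rightmost fastest
def pvProduct : List (List String) → List (List String)
  | [] => [[]]
  | os :: rest => os.flatMap (fun o => (pvProduct rest).map (fun c => o :: c))

def expand_phonetic_variants_py (parts : List String) : List String :=
  let options_per_part := parts.map pvOptions
  ((pvProduct options_per_part).take 8).map (fun combo => PySem.Str.join " " combo)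

-- ===== PORT B =====
-- B's module constants: the keys whose phonetic variant is just the key spelled out,
-- and the five irregular extra variants
def pvSpell : PySem.Set String := PySem.Set.ofList ["js", "ts", "ml", "ai", "sql", "api", "llm", "cli", "gpu", "cpu", "npm", "aws", "gcp", "ssh", "url", "gui", "ux", "ui", "ci", "cd", "qa", "os", "io", "vm", "k8s", "pr", "env", "mcp"]

def pvExtra : PySem.Dict String String := PySem.Dict.ofList [
  ("py", "pie"), ("db", "dee bee"), ("sql", "sequel"), ("gui", "gooey"), ("k8s", "kubernetes")]

-- options(key): [key], plus " ".join(key) if key in _SPELL_OUT, plus _EXTRA.get(key)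
def pvOptsAlt (key : String) : List String :=
  let opts := [key]
  let opts := if PySem.Set.contains pvSpell key
    then opts ++ [String.ofList (PySem.Chars.join [' '] (key.toList.map (fun c => [c])))]
    else opts
  match pvExtra.get? key with
  | some extra => opts ++ [extra]
  | none => opts

-- B's cons-cell chains (None / (parent, opt)) are encoded as reversed List String:
-- None ↔ [], (parent, opt) ↔ opt :: parent; materializing is .reverse then join
def expand_phonetic_variants_py_alt (parts : List String) : List String :=
  (parts.foldl
    (fun acc part =>
      (acc.flatMap (fun chain => (pvOptsAlt (PySem.Str.lower part)).map (fun opt => opt :: chain))).take 8)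
    [[]]).map (fun chain => PySem.Str.join " " chain.reverse)

-- ===== PRECONDITION & SPEC =====
def Spec_expand_phonetic_variants_py (parts : List String) (out : List String) : Prop := out = expand_phonetic_variants_py_alt parts
instance (parts : List String) (out : List String) : Decidable (Spec_expand_phonetic_variants_py parts out) := by unfold Spec_expand_phonetic_variants_py; infer_instance

-- ===== CLAIM =====
def Claim_equal_expand_phonetic_variants_py : Prop := ∀ (parts : List String), Dom_expand_phonetic_variants_py parts → Spec_expand_phonetic_variants_py parts (expand_phonetic_variants_py parts)

-- ===== LEMMAS AND PROOFS =====

-- B's rule-derived option list agrees with A's stored table, key by key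
theorem options_eq (part : String) : pvOptsAlt (PySem.Str.lower part) = pvOptions part := by
  unfold pvOptions
  generalize PySem.Str.lower part = key
  by_cases h1 : key = "py"
  · subst h1; decide
  by_cases h2 : key = "db"
  · subst h2; decide
  by_cases h3 : key = "js"
  · subst h3; decide
  by_cases h4 : key = "ts"
  · subst h4; decide
  by_cases h5 : key = "ml"
  · subst h5; decide
  by_cases h6 : key = "ai"
  · subst h6; decide
  by_cases h7 : key = "sql"
  · subst h7; decide
  by_cases h8 : key = "api"
  · subst h8; decide
  by_cases h9 : key = "llm"
  · subst h9; decide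
  by_cases h10 : key = "cli"
  · subst h10; decide
  by_cases h11 : key = "gpu"
  · subst h11; decide
  by_cases h12 : key = "cpu"
  · subst h12; decide
  by_cases h13 : key = "npm"
  · subst h13; decide
  by_cases h14 : key = "aws"
  · subst h14; decide
  by_cases h15 : key = "gcp"
  · subst h15; decide
  by_cases h16 : key = "ssh"
  · subst h16; decide
  by_cases h17 : key = "url"
  · subst h17; decide
  by_cases h18 : key = "gui"
  · subst h18; decide
  by_cases h19 : key = "ux"
  · subst h19; decide
  by_cases h20 : key = "ui"
  · subst h20; decide
  by_cases h21 : key = "ci"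
  · subst h21; decide
  by_cases h22 : key = "cd"
  · subst h22; decide
  by_cases h23 : key = "qa"
  · subst h23; decide
  by_cases h24 : key = "os"
  · subst h24; decide
  by_cases h25 : key = "io"
  · subst h25; decide
  by_cases h26 : key = "vm"
  · subst h26; decide
  by_cases h27 : key = "k8s"
  · subst h27; decide
  by_cases h28 : key = "pr"
  · subst h28; decide
  by_cases h29 : key = "env"
  · subst h29; decide
  by_cases h30 : key = "mcp"
  · subst h30; decide
  have hs : key ∉ pvSpell := by
    simp [pvSpell, PySem.Set.mem_ofList, h3, h4, h5, h6, h7, h8, h9, h10, h11, h12, h13, h14, h15, h16, h17, h18, h19, h20, h21, h22, h23, h24, h25, h26, h27, h28, h29, h30]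
  have he : pvExtra.get? key = none := by
    rw [PySem.Dict.get?_eq_none_iff_not_mem_keys]
    have ek : pvExtra.keys = ["py", "db", "sql", "gui", "k8s"] := by decide
    simp [ek, h1, h2, h7, h18, h27]
  have ha : pvSubs.get? key = none := by
    rw [PySem.Dict.get?_eq_none_iff_not_mem_keys]
    have ak : pvSubs.keys = ["py", "db", "js", "ts", "ml", "ai", "sql", "api", "llm", "cli", "gpu", "cpu", "npm", "aws", "gcp", "ssh", "url", "gui", "ux", "ui", "ci", "cd", "qa", "os", "io", "vm", "k8s", "pr", "env", "mcp"] := by decide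
    simp [ak, h1, h2, h3, h4, h5, h6, h7, h8, h9, h10, h11, h12, h13, h14, h15, h16, h17, h18, h19, h20, h21, h22, h23, h24, h25, h26, h27, h28, h29, h30]
  simp [pvOptsAlt, hs, he, ha]

theorem pvOptions_ne_nil (p : String) : pvOptions p ≠ [] := by
  unfold pvOptions
  simp only []
  split <;> simp

theorem pvProduct_map_options_ne_nil (ps : List String) :
    pvProduct (ps.map pvOptions) ≠ [] := by
  induction ps with
  | nil => simp [pvProduct]
  | cons p ps ih =>
    simp only [List.map_cons, pvProduct, ne_eq, List.flatMap_eq_nil_iff, not_forall]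
    exact ⟨(pvOptions p).head (pvOptions_ne_nil p),
      List.head_mem _, by simpa using ih⟩

-- pruning a list to n before flatMap does not change the first m ≤ n results,
-- provided every block is nonempty
theorem take_flatMap_take {α β : Type} (f : α → List β) (hf : ∀ x, f x ≠ [])
    (l : List α) : ∀ n m, m ≤ n → ((l.take n).flatMap f).take m = (l.flatMap f).take m := by
  induction l with
  | nil => simp
  | cons a l ih =>
    intro n m hmn
    cases n with
    | zero => interval_cases m; simp
    | succ n =>
      simp only [List.take_succ_cons, List.flatMap_cons, List.take_append]
      rw [ih n (m - (f a).length) (by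
        have := List.length_pos_iff.mpr (hf a); omega)]

theorem foldl_step_eq (ps : List String) :
    ∀ (acc : List (List String)), acc.length ≤ 8 →
    ps.foldl
      (fun acc part =>
        (acc.flatMap (fun chain => (pvOptions part).map (fun opt => opt :: chain))).take 8)
      acc
    = (acc.flatMap (fun chain =>
        (pvProduct (ps.map pvOptions)).map (fun c => c.reverse ++ chain))).take 8 := by
  induction ps with
  | nil =>
    intro acc hacc
    simp [pvProduct, List.take_of_length_le, hacc]
  | cons p ps ih =>
    intro acc hacc
    simp only [List.foldl_cons]
    rw [ih _ (by simp)]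
    rw [take_flatMap_take _
      (fun x => by simpa using pvProduct_map_options_ne_nil ps) _ 8 8 le_rfl]
    congr 1
    simp [List.flatMap_assoc, List.flatMap_map, List.map_flatMap,
      List.map_map, Function.comp_def, pvProduct]

-- ===== VERDICT =====
theorem expand_phonetic_variants_py_spec : Claim_equal_expand_phonetic_variants_py := by
  intro parts _
  unfold Spec_expand_phonetic_variants_py expand_phonetic_variants_py expand_phonetic_variants_py_alt
  have hf : (fun (acc : List (List String)) (part : String) =>
        (acc.flatMap (fun chain => (pvOptsAlt (PySem.Str.lower part)).map (fun opt => opt :: chain))).take 8)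
      = (fun (acc : List (List String)) (part : String) =>
        (acc.flatMap (fun chain => (pvOptions part).map (fun opt => opt :: chain))).take 8) := by
    funext acc part; rw [options_eq]
  rw [hf, foldl_step_eq parts [[]] (by simp)]
  simp [List.map_take, Function.comp_def, List.reverse_reverse]
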